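-- pv_equiv track=rewrite | github.com/dfield18/ai-visibility-backend | app/services/site_audit_service.py | _parse_llms_txt
-- ===== SOURCE A (Python) =====
-- from typing import Any, Dict, List, Optional, Tuple
--
-- def _parse_llms_txt(content: str) -> Dict[str, str]:
--     """Parse llms.txt content into sections.
--
--     Args:
--         content: The llms.txt content.
--
--     Returns:
--         Dict of section name to content.
--     """
--     sections = {}
--     current_section = "default"
--     current_content = []
--
--     for line in content.split("\n"):
--         # Check for section headers (e.g., "# Section Name")
--         if line.startswith("# "):
--             if current_content:
--                 sections[current_section] = "\n".join(current_content).strip()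
--             current_section = line[2:].strip().lower().replace(" ", "_")
--             current_content = []
--         else:
--             current_content.append(line)
--
--     if current_content:
--         sections[current_section] = "\n".join(current_content).strip()
--
--     return sections
-- ===== SOURCE B (Python) =====
-- def _split_at_header(lines):
--     """Split a line list at the first '# ' header: (before, from-header-on)."""
--     for i, line in enumerate(lines):
--         if line.startswith("# "):
--             return lines[:i], lines[i:]
--     return lines, []
--
--
-- def _parse_llms_txt(content: str) -> dict:
--     sections = {}
--     lines = content.split("\n")
--     name = "default"
--     while True:
--         seg, rest = _split_at_header(lines)
--         if seg:
--             sections[name] = "\n".join(seg).strip()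
--         if not rest:
--             return sections
--         name = rest[0][2:].strip().lower().replace(" ", "_")
--         lines = rest[1:]
-- ===== Notes on version B (the rewrite author's own statement) =====
-- stated objective: alternative
-- what changed: B parses segment-at-a-time: a helper splits the remaining lines at the first header line and the loop consumes one whole section per iteration, instead of A's line-at-a-time state machine carrying a current-section accumulator.
import Mathlib
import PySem

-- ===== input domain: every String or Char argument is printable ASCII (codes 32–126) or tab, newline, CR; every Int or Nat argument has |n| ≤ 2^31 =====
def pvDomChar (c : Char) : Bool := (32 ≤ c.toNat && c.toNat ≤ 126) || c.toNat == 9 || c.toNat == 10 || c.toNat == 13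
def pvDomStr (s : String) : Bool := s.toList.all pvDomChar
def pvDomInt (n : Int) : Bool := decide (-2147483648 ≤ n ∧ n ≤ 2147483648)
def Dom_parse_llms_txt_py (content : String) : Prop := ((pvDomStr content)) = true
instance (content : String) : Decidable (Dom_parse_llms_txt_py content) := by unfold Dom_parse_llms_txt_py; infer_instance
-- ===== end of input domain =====

-- B replaces A's line-at-a-time state machine by a segment-at-a-time loop (split at next header); alternative decomposition, same return value.

-- ===== PORT A =====
-- line[2:].strip().lower().replace(" ", "_")
def pvNormA (line : String) : String :=
  PySem.Str.replace (PySem.Str.lower (PySem.Str.strip (PySem.Str.slice line (some 2) none))) " " "_"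

-- the 'for line in content.split("\n")' loop plus the trailing flush, state = (sections, current_section, current_content)
def pvLoopA : List String → PySem.Dict String String → String → List String → PySem.Dict String String
  | [], sections, cur, acc =>
      if acc ≠ [] then sections.insert cur (PySem.Str.strip (PySem.Str.join "\n" acc)) else sections
  | l :: ls, sections, cur, acc =>
      if PySem.Str.startswith l "# " then
        pvLoopA ls
          (if acc ≠ [] then sections.insert cur (PySem.Str.strip (PySem.Str.join "\n" acc)) else sections)
          (pvNormA l) []
      else
        pvLoopA ls sections cur (acc ++ [l])

def parse_llms_txt_py (content : String) : List (String × String) :=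
  (pvLoopA ((PySem.Str.split? content "\n").getD []) PySem.Dict.empty "default" []).items

-- ===== PORT B =====
def pvIsHeader (l : String) : Bool := PySem.Str.startswith l "# "

-- _split_at_header: first index with a '# ' header; lines[:i], lines[i:] — exactly List.takeWhile/dropWhile on (¬ header)
def pvSplitAtHeader (lines : List String) : List String × List String :=
  (lines.takeWhile (fun l => !pvIsHeader l), lines.dropWhile (fun l => !pvIsHeader l))

def pvNormB (h : String) : String :=
  PySem.Str.replace (PySem.Str.lower (PySem.Str.strip (PySem.Str.slice h (some 2) none))) " " "_"

-- the 'while True' loop of B, one whole section per iteration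
def pvLoopB (lines : List String) (name : String) (sections : PySem.Dict String String) :
    PySem.Dict String String :=
  let seg := (pvSplitAtHeader lines).1
  let sections' := if seg ≠ [] then sections.insert name (PySem.Str.strip (PySem.Str.join "\n" seg)) else sections
  match hr : (pvSplitAtHeader lines).2 with
  | [] => sections'
  | h :: t => pvLoopB t (pvNormB h) sections'
  termination_by lines.length
  decreasing_by
    have h1 : (lines.dropWhile (fun l => !pvIsHeader l)).length ≤ lines.length :=
      List.length_dropWhile_le _ _
    have h2 : (pvSplitAtHeader lines).2.length ≤ lines.length := h1
    rw [hr] at h2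
    simp at h2; omega

def parse_llms_txt_py_alt (content : String) : List (String × String) :=
  (pvLoopB ((PySem.Str.split? content "\n").getD []) "default" PySem.Dict.empty).items

-- ===== PRECONDITION & SPEC =====
def Spec_parse_llms_txt_py (content : String) (out : List (String × String)) : Prop := out = parse_llms_txt_py_alt content
instance (content : String) (out : List (String × String)) : Decidable (Spec_parse_llms_txt_py content out) := by unfold Spec_parse_llms_txt_py; infer_instance

-- ===== CLAIM (what is proved, stated in full; the proofs are below) =====
def Claim_equal_parse_llms_txt_py : Prop := ∀ (content : String), Dom_parse_llms_txt_py content → Spec_parse_llms_txt_py content (parse_llms_txt_py content)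

-- ===== LEMMAS AND PROOFS =====

-- unfold pvLoopB when no header remains
theorem pvLoopB_of_drop_nil (lines : List String) (name : String) (d : PySem.Dict String String)
    (h : lines.dropWhile (fun l => !pvIsHeader l) = []) :
    pvLoopB lines name d =
      (if lines.takeWhile (fun l => !pvIsHeader l) ≠ [] then
        d.insert name (PySem.Str.strip (PySem.Str.join "\n" (lines.takeWhile (fun l => !pvIsHeader l))))
      else d) := by
  rw [pvLoopB]
  simp only [pvSplitAtHeader]
  split
  · rfl
  · next x t heq => rw [h] at heq; cases heq

-- unfold pvLoopB when the remainder starts with a header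
theorem pvLoopB_of_drop_cons (lines : List String) (name : String) (d : PySem.Dict String String)
    (x : String) (t : List String)
    (h : lines.dropWhile (fun l => !pvIsHeader l) = x :: t) :
    pvLoopB lines name d =
      pvLoopB t (pvNormB x)
        (if lines.takeWhile (fun l => !pvIsHeader l) ≠ [] then
          d.insert name (PySem.Str.strip (PySem.Str.join "\n" (lines.takeWhile (fun l => !pvIsHeader l))))
        else d) := by
  rw [pvLoopB]
  simp only [pvSplitAtHeader]
  split
  · next heq => rw [h] at heq; cases heq
  · next y u heq =>
      rw [h] at heq
      cases heq
      rfl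

-- A's loop with pending accumulator acc (which contains no header lines) equals B's loop
-- applied to acc ++ lines: the accumulator is the beginning of the current segment.
theorem pvLoopA_eq_loopB :
    ∀ (lines acc : List String) (cur : String) (d : PySem.Dict String String),
      (∀ l ∈ acc, pvIsHeader l = false) →
      pvLoopA lines d cur acc = pvLoopB (acc ++ lines) cur d := by
  intro lines
  induction lines with
  | nil =>
    intro acc cur d hacc
    have hne : ∀ x ∈ acc, (fun l => !pvIsHeader l) x = true := by
      intro x hx; simp [hacc x hx]
    have htake : acc.takeWhile (fun l => !pvIsHeader l) = acc :=
      List.takeWhile_eq_self_iff.mpr hne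
    have hdrop : acc.dropWhile (fun l => !pvIsHeader l) = [] :=
      List.dropWhile_eq_nil_iff.mpr hne
    rw [List.append_nil, pvLoopB_of_drop_nil _ _ _ hdrop, htake]
    rfl
  | cons l ls ih =>
    intro acc cur d hacc
    have hne : ∀ x ∈ acc, (fun l => !pvIsHeader l) x = true := by
      intro x hx; simp [hacc x hx]
    by_cases hl : pvIsHeader l = true
    · have htake : (acc ++ l :: ls).takeWhile (fun x => !pvIsHeader x) = acc := by
        rw [List.takeWhile_append]
        simp [List.takeWhile_eq_self_iff.mpr hne, hl]
      have hdrop : (acc ++ l :: ls).dropWhile (fun x => !pvIsHeader x) = l :: ls := by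
        rw [List.dropWhile_append]
        simp [List.dropWhile_eq_nil_iff.mpr hne, hl]
      rw [pvLoopB_of_drop_cons _ _ _ l ls hdrop, htake]
      have hl2 : PySem.Str.startswith l "# " = true := hl
      have hstep : pvLoopA (l :: ls) d cur acc =
          pvLoopA ls
            (if acc ≠ [] then d.insert cur (PySem.Str.strip (PySem.Str.join "\n" acc)) else d)
            (pvNormA l) [] := by
        simp only [pvLoopA]
        rw [if_pos hl2]
      rw [hstep, ih [] (pvNormA l) _ (by simp), List.nil_append]
      rfl
    · have hl' : pvIsHeader l = false := by simpa using hl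
      have hstep : pvLoopA (l :: ls) d cur acc = pvLoopA ls d cur (acc ++ [l]) := by
        simp only [pvLoopA, pvIsHeader] at hl' ⊢
        rw [hl']
        simp
      rw [hstep, ih (acc ++ [l]) cur d (by
        intro x hx
        rcases List.mem_append.mp hx with h | h
        · exact hacc x h
        · simp at h; subst h; exact hl'), List.append_assoc]
      rfl

-- ===== VERDICT (by name: the statement is the Claim_ definition above) =====
theorem parse_llms_txt_py_spec : Claim_equal_parse_llms_txt_py := by
  intro content _
  unfold Spec_parse_llms_txt_py parse_llms_txt_py parse_llms_txt_py_alt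
  rw [pvLoopA_eq_loopB _ [] _ _ (by simp)]
  rfl
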